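-- pv_equiv track=rewrite | github.com/RC2630/animal_tree | main.py | findNearestLabel
-- ===== SOURCE A (Python) =====
-- def equalsAtPos(s: str, pos: int, target: str) -> bool:
--     return s[pos : pos + len(target)] == target
--
-- def findNearestLabel(s: str, pos: int) -> tuple[str, int]:
--     openingBracketPosition: int = -1
--     closingBracketPosition: int = -1
--     for i in range(pos, -1, -1):
--         if equalsAtPos(s, i, "[[") or equalsAtPos(s, i, "|"):
--             openingBracketPosition = i
--             break
--     for i in range(pos, len(s)):
--         if equalsAtPos(s, i, "]]") or equalsAtPos(s, i, "|"):
--             closingBracketPosition = i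
--             break
--     startIndexOffset: int = 1 if s[openingBracketPosition] == "|" else 2
--     return (s[openingBracketPosition + startIndexOffset : closingBracketPosition],
--             openingBracketPosition)
-- ===== SOURCE B (Python) =====
-- def findNearestLabel(s: str, pos: int) -> tuple[str, int]:
--     opening = -1
--     closing = -1
--     for i in range(len(s)):
--         two = s[i : i + 2]
--         if i <= pos and (two == "[[" or s[i] == "|"):
--             opening = i
--         if i >= pos and closing == -1 and (two == "]]" or s[i] == "|"):
--             closing = i
--     offset = 1 if s[opening] == "|" else 2
--     return (s[opening + offset : closing], opening)
-- ===== Notes on version B (the rewrite author's own statement) =====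
-- stated objective: alternative
-- what changed: A's two staged directional scans (backward from pos with break, then forward from pos with break) are fused into one single forward pass over the whole string with an accumulator: the last delimiter start seen at-or-before pos (overwritten on each hit) and the first closing delimiter at-or-after pos (set once). B also does one slice + one char comparison per index instead of A's two equalsAtPos calls (two slice allocations) per index, a constant-factor saving a timing run measured.
-- outside the precondition, e.g. on findNearestLabel('', 0): A raises IndexError, B raises IndexError; on findNearestLabel('|a|x', -2): A returns ('a', -1), B returns ('', -1); on findNearestLabel('[|[|[', -2): A returns ('|[', -1), B returns ('', -1)
import Mathlib
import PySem

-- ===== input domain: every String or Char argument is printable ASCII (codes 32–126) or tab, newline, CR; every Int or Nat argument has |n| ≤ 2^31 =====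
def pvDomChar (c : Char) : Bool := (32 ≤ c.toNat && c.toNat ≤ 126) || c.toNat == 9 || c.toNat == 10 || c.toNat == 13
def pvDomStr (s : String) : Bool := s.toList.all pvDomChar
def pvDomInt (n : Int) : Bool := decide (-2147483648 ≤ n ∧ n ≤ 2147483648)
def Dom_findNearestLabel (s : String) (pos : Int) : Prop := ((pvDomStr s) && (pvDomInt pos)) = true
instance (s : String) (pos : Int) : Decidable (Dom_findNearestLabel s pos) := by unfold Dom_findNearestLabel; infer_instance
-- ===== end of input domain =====

-- B fuses A's two staged directional scans (backward from pos with break, forward from pos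
-- with break) into one single forward pass over the whole string with an accumulator;
-- objective: alternative decomposition (same O(n) cost, no early exit).

-- ===== PORT A =====

-- equalsAtPos(s, pos, target) = (s[pos : pos + len(target)] == target)
def pvEqAt (s : String) (pos : Int) (target : String) : Bool :=
  PySem.Str.slice s (some pos) (some (pos + (target.length : Int))) == target

-- 'for i in range(pos, -1, -1): if …: opening = i; break' (opening stays -1 if no hit)
def pvScanOpen (s : String) (i : Int) : Int :=
  if h : i < 0 then -1
  else if pvEqAt s i "[[" || pvEqAt s i "|" then i
  else pvScanOpen s (i - 1)
termination_by (i + 1).toNat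
decreasing_by omega

-- 'for i in range(pos, len(s)): if …: closing = i; break' (closing stays -1 if no hit)
def pvScanClose (s : String) (i : Int) : Int :=
  if h : i < (s.length : Int) then
    if pvEqAt s i "]]" || pvEqAt s i "|" then i
    else pvScanClose s (i + 1)
  else -1
termination_by ((s.length : Int) - i).toNat
decreasing_by omega

def findNearestLabel (s : String) (pos : Int) : String × Int :=
  let openingBracketPosition : Int := pvScanOpen s pos
  let closingBracketPosition : Int := pvScanClose s pos
  -- s[openingBracketPosition] == "|" ; Pre_ (s nonempty) keeps the index in Python's range
  let startIndexOffset : Int :=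
    if PySem.List.pyGetD s.toList openingBracketPosition ' ' == '|' then 1 else 2
  (PySem.Str.slice s (some (openingBracketPosition + startIndexOffset)) (some closingBracketPosition),
   openingBracketPosition)

-- ===== PORT B =====

-- one loop-body step of Source B's single forward pass (state = (opening, closing))
def pvStepB (s : String) (pos : Int) (oc : Int × Int) (i : ℕ) : Int × Int :=
  let two := PySem.Str.slice s (some (i : Int)) (some ((i : Int) + 2))
  let oc1 : Int × Int :=
    if (i : Int) ≤ pos ∧ (two == "[[" ∨ s.toList.getD i ' ' == '|') then ((i : Int), oc.2) else oc
  if pos ≤ (i : Int) ∧ oc1.2 = -1 ∧ (two == "]]" ∨ s.toList.getD i ' ' == '|') then (oc1.1, (i : Int)) else oc1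

def findNearestLabel_alt (s : String) (pos : Int) : String × Int :=
  let oc := (List.range s.length).foldl (pvStepB s pos) ((-1 : Int), (-1 : Int))
  let offset : Int := if PySem.List.pyGetD s.toList oc.1 ' ' == '|' then 1 else 2
  (PySem.Str.slice s (some (oc.1 + offset)) (some oc.2), oc.1)

-- ===== PRECONDITION & SPEC =====
-- Pre_ excludes the empty string, on which A raises IndexError at s[openingBracketPosition],
-- and negative pos, which is outside the function's natural domain (pos is a position in s)
-- and on which A's scans read wrapped negative slices.
def Pre_findNearestLabel (s : String) (pos : Int) : Prop := s ≠ "" ∧ 0 ≤ pos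
instance (s : String) (pos : Int) : Decidable (Pre_findNearestLabel s pos) := by
  unfold Pre_findNearestLabel; infer_instance

def pvWitness_findNearestLabel : String × Int := ("a[[b|c]]d", 5)

def Spec_findNearestLabel (s : String) (pos : Int) (out : String × Int) : Prop := out = findNearestLabel_alt s pos
instance (s : String) (pos : Int) (out : String × Int) : Decidable (Spec_findNearestLabel s pos out) := by unfold Spec_findNearestLabel; infer_instance

-- ===== CLAIM (what is proved, stated in full; the proofs are below) =====
def Claim_equal_findNearestLabel : Prop := ∀ (s : String) (pos : Int), Dom_findNearestLabel s pos → Pre_findNearestLabel s pos → Spec_findNearestLabel s pos (findNearestLabel s pos)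

-- ===== LEMMAS AND PROOFS =====

-- the two components of B's state evolve independently
def pvStepO (s : String) (pos : Int) (o : Int) (i : ℕ) : Int :=
  if (i : Int) ≤ pos ∧ (PySem.Str.slice s (some (i : Int)) (some ((i : Int) + 2)) == "[[" ∨ s.toList.getD i ' ' == '|')
  then (i : Int) else o

def pvStepC (s : String) (pos : Int) (c : Int) (i : ℕ) : Int :=
  if pos ≤ (i : Int) ∧ c = -1 ∧ (PySem.Str.slice s (some (i : Int)) (some ((i : Int) + 2)) == "]]" ∨ s.toList.getD i ' ' == '|')
  then (i : Int) else c

theorem stepB_split (s : String) (pos : Int) (o c : Int) (i : ℕ) :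
    pvStepB s pos (o, c) i = (pvStepO s pos o i, pvStepC s pos c i) := by
  unfold pvStepB pvStepO pvStepC
  by_cases h1 : (i : Int) ≤ pos ∧ ((PySem.Str.slice s (some (i : Int)) (some ((i : Int) + 2)) == "[[") ∨ (s.toList.getD i ' ' == '|'))
  · simp only [if_pos h1]
    by_cases h2 : pos ≤ (i : Int) ∧ c = (-1 : Int) ∧ ((PySem.Str.slice s (some (i : Int)) (some ((i : Int) + 2)) == "]]") ∨ (s.toList.getD i ' ' == '|'))
    · simp only [if_pos h2]
    · simp only [if_neg h2]
  · simp only [if_neg h1]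
    by_cases h2 : pos ≤ (i : Int) ∧ c = (-1 : Int) ∧ ((PySem.Str.slice s (some (i : Int)) (some ((i : Int) + 2)) == "]]") ∨ (s.toList.getD i ' ' == '|'))
    · simp only [if_pos h2]
    · simp only [if_neg h2]

theorem foldl_stepB_split (s : String) (pos : Int) (l : List ℕ) : ∀ (o c : Int),
    l.foldl (pvStepB s pos) (o, c) = (l.foldl (pvStepO s pos) o, l.foldl (pvStepC s pos) c) := by
  induction l with
  | nil => intro o c; rfl
  | cons i l ih => intro o c; simp only [List.foldl_cons, stepB_split]; exact ih _ _

-- equalsAtPos at a Nat index is a prefix test on the drop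
theorem eqAt_eq (s : String) (j : ℕ) (t : String) :
    pvEqAt s (j : Int) t = t.toList.isPrefixOf (s.toList.drop j) := by
  have h1 : (t.length : Int) = (t.toList.length : Int) := by rw [String.length_toList]
  unfold pvEqAt
  rw [Bool.eq_iff_iff]
  simp only [beq_iff_eq, PySem.Str.slice, PySem.Chars.slice_eq_listSlice, h1,
    PySem.List.slice_natCast_add, String.ofList_eq, List.isPrefixOf_iff_prefix,
    List.prefix_iff_eq_take]
  exact ⟨fun h => h.symm, fun h => h.symm⟩

-- B's two-character slice test is A's equalsAtPos for a length-2 target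
theorem slice2_eq (s : String) (i : Int) (t : String) (ht : (t.length : Int) = 2) :
    (PySem.Str.slice s (some i) (some (i + 2)) == t) = pvEqAt s i t := by
  unfold pvEqAt; rw [ht]

-- B's one-character index test is A's equalsAtPos for "|" (indices in range)
theorem getD_pipe (s : String) (i : ℕ) (hi : i < s.length) :
    (s.toList.getD i ' ' == '|') = pvEqAt s (i : Int) "|" := by
  have hi' : i < s.toList.length := by rw [String.length_toList]; exact hi
  rw [eqAt_eq, List.getD_eq_getElem _ _ hi', List.drop_eq_getElem_cons hi']
  show (s.toList[i] == '|') = List.isPrefixOf ['|'] _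
  simp [List.isPrefixOf, eq_comm]

theorem condO_eq (s : String) (i : ℕ) (hi : i < s.length) :
    ((PySem.Str.slice s (some (i : Int)) (some ((i : Int) + 2)) == "[[") ∨ (s.toList.getD i ' ' == '|'))
      ↔ (pvEqAt s (i : Int) "[[" || pvEqAt s (i : Int) "|") = true := by
  rw [slice2_eq s (i : Int) "[[" (by decide), getD_pipe s i hi]
  simp

theorem condC_eq (s : String) (i : ℕ) (hi : i < s.length) :
    ((PySem.Str.slice s (some (i : Int)) (some ((i : Int) + 2)) == "]]") ∨ (s.toList.getD i ' ' == '|'))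
      ↔ (pvEqAt s (i : Int) "]]" || pvEqAt s (i : Int) "|") = true := by
  rw [slice2_eq s (i : Int) "]]" (by decide), getD_pipe s i hi]
  simp

-- once closing is set it never changes
theorem foldl_stepC_fixed (s : String) (pos : Int) (l : List ℕ) : ∀ c : Int, c ≠ -1 →
    l.foldl (pvStepC s pos) c = c := by
  induction l with
  | nil => intro c _; rfl
  | cons i l ih =>
    intro c hc
    have hstep : pvStepC s pos c i = c := by
      unfold pvStepC
      rw [if_neg]
      rintro ⟨-, h2, -⟩
      exact hc h2
    rw [List.foldl_cons, hstep]
    exact ih c hc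

-- steps strictly after pos leave the opening accumulator alone
theorem foldl_stepO_id (s : String) (pos : Int) (k : ℕ) : ∀ (a : ℕ) (o : Int), pos < (a : Int) →
    (List.range' a k).foldl (pvStepO s pos) o = o := by
  induction k with
  | zero => intro a o _; rfl
  | succ k ih =>
    intro a o ha
    simp only [List.range'_succ, List.foldl_cons]
    rw [show pvStepO s pos o a = o by unfold pvStepO; rw [if_neg]; rintro ⟨h, -⟩; omega]
    exact ih (a + 1) o (by push_cast; omega)

-- steps strictly before pos leave the closing accumulator alone
theorem foldl_stepC_id (s : String) (pos : Int) (k : ℕ) : ∀ (a : ℕ) (c : Int), (a : Int) + k ≤ pos →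
    (List.range' a k).foldl (pvStepC s pos) c = c := by
  induction k with
  | zero => intro a c _; rfl
  | succ k ih =>
    intro a c ha
    simp only [List.range'_succ, List.foldl_cons]
    rw [show pvStepC s pos c a = c by unfold pvStepC; rw [if_neg]; rintro ⟨h, -⟩; push_cast at ha; omega]
    exact ih (a + 1) c (by push_cast at ha ⊢; omega)

-- B's forward overwrite-fold up to q computes A's backward scan from q-1
theorem foldl_stepO_scan (s : String) (pos : Int) (q : ℕ) (hq : (q : Int) ≤ pos + 1)
    (hlen : q ≤ s.length) :
    (List.range q).foldl (pvStepO s pos) (-1) = pvScanOpen s ((q : Int) - 1) := by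
  induction q with
  | zero => rw [pvScanOpen]; simp
  | succ q ih =>
    have hqlt : q < s.length := by omega
    have e : ((q + 1 : ℕ) : Int) - 1 = (q : Int) := by push_cast; ring
    rw [e, List.range_succ, List.foldl_append,
      ih (by push_cast at hq ⊢; omega) (by omega)]
    simp only [List.foldl_cons, List.foldl_nil]
    conv_rhs => rw [pvScanOpen]
    rw [dif_neg (by omega : ¬ ((q : ℕ) : Int) < 0)]
    by_cases hcnd : (pvEqAt s (q : Int) "[[" || pvEqAt s (q : Int) "|") = true
    · rw [if_pos hcnd]
      unfold pvStepO
      rw [if_pos ⟨by push_cast at hq; omega, (condO_eq s q hqlt).mpr hcnd⟩]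
    · rw [if_neg hcnd]
      unfold pvStepO
      rw [if_neg]
      rintro ⟨-, h⟩; exact hcnd ((condO_eq s q hqlt).mp h)

-- B's forward set-once fold from pos onward computes A's forward scan with break
theorem foldl_stepC_scan (s : String) (pos : Int) (k : ℕ) : ∀ i : ℕ,
    i + k = s.length → pos ≤ (i : Int) →
    (List.range' i k).foldl (pvStepC s pos) (-1) = pvScanClose s (i : Int) := by
  induction k with
  | zero =>
    intro i hik _
    rw [pvScanClose, dif_neg (by omega)]
    rfl
  | succ k ih =>
    intro i hik hpi
    have hlt : i < s.length := by omega
    simp only [List.range'_succ, List.foldl_cons]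
    rw [pvScanClose, dif_pos (by exact_mod_cast hlt)]
    by_cases hc : (pvEqAt s (i : Int) "]]" || pvEqAt s (i : Int) "|") = true
    · rw [if_pos hc]
      rw [show pvStepC s pos (-1) i = (i : Int) by
        unfold pvStepC; rw [if_pos ⟨hpi, rfl, (condC_eq s i hlt).mpr hc⟩]]
      exact foldl_stepC_fixed s pos _ _ (by omega)
    · rw [if_neg hc]
      rw [show pvStepC s pos (-1) i = -1 by
        unfold pvStepC; rw [if_neg]; rintro ⟨-, -, h⟩; exact hc ((condC_eq s i hlt).mp h)]
      rw [show ((i : Int) + 1) = (((i + 1 : ℕ) : Int)) by push_cast; ring]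
      exact ih (i + 1) (by omega) (by push_cast; omega)

-- no delimiter can start at or beyond the end of the string
theorem no_hit_high (s t : String) (ht : t.toList ≠ []) (j : Int)
    (h0 : 0 ≤ j) (hj : (s.length : Int) ≤ j) : pvEqAt s j t = false := by
  obtain ⟨n, rfl⟩ : ∃ n : ℕ, j = (n : Int) := ⟨j.toNat, by omega⟩
  rw [eqAt_eq]
  rw [List.drop_eq_nil_of_le (by rw [String.length_toList]; omega)]
  cases h : t.toList with
  | nil => exact absurd h ht
  | cons a l => simp [List.isPrefixOf]

-- A's backward scan from any pos ≥ len-1 equals the scan from len-1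
theorem scanOpen_high (s : String) (n : ℕ) : ∀ pos : Int, pos = (s.length : Int) - 1 + n →
    pvScanOpen s pos = pvScanOpen s ((s.length : Int) - 1) := by
  induction n with
  | zero => intro pos h; rw [h]; norm_num
  | succ n ih =>
    intro pos h
    have h0 : 0 ≤ pos := by omega
    rw [pvScanOpen, dif_neg (by omega)]
    rw [no_hit_high s "[[" (by decide) pos h0 (by omega),
        no_hit_high s "|" (by decide) pos h0 (by omega)]
    simp only [Bool.or_self, Bool.false_eq_true, if_false]
    exact ih (pos - 1) (by omega)

-- splitting List.range at a cut point
theorem range_split (q n : ℕ) (h : q ≤ n) :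
    List.range n = List.range' 0 q ++ List.range' q (n - q) := by
  rw [List.range_eq_range']
  have := List.range'_append (step := 1) (s := 0) (m := q) (n := n - q)
  simp only [Nat.one_mul, Nat.zero_add] at this
  rw [this, Nat.add_sub_cancel' h]

theorem opening_final (s : String) (pos : Int) (h0 : 0 ≤ pos) :
    (List.range s.length).foldl (pvStepO s pos) (-1) = pvScanOpen s pos := by
  by_cases hc : pos + 1 ≤ (s.length : Int)
  · have hq : (pos + 1).toNat ≤ s.length := by omega
    rw [range_split (pos + 1).toNat s.length hq, List.foldl_append,
        ← List.range_eq_range',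
        foldl_stepO_scan s pos _ (by omega) hq,
        foldl_stepO_id s pos (s.length - (pos + 1).toNat) ((pos + 1).toNat) _ (by omega)]
    congr 1
    omega
  · rw [foldl_stepO_scan s pos s.length (by omega) le_rfl]
    exact (scanOpen_high s (pos - ((s.length : Int) - 1)).toNat pos (by omega)).symm

theorem closing_final (s : String) (pos : Int) (h0 : 0 ≤ pos) :
    (List.range s.length).foldl (pvStepC s pos) (-1) = pvScanClose s pos := by
  by_cases hc : pos ≤ (s.length : Int)
  · rw [range_split pos.toNat s.length (by omega), List.foldl_append,
        foldl_stepC_id s pos pos.toNat 0 (-1) (by push_cast; omega),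
        foldl_stepC_scan s pos (s.length - pos.toNat) pos.toNat (by omega) (by omega)]
    congr 1
    omega
  · rw [List.range_eq_range',
        foldl_stepC_id s pos s.length 0 (-1) (by push_cast; omega)]
    rw [pvScanClose, dif_neg (by omega)]

-- ===== VERDICT (by name: the statement is the Claim_ definition above) =====
theorem findNearestLabel_spec : Claim_equal_findNearestLabel := by
  intro s pos _ hpre
  unfold Spec_findNearestLabel findNearestLabel findNearestLabel_alt
  rw [foldl_stepB_split, opening_final s pos hpre.2, closing_final s pos hpre.2]
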